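-- pv_equiv track=rewrite | github.com/jwun95/CodingTest | 백준/그리디/2212.py | solution
-- ===== SOURCE A (Python) =====
-- def solution(N, K, datas):
--     if N == 1:
--         return 0
--
--     datas.sort()
--
--     if K == 1:
--         return datas[-1] - datas[0]
--
--     gaps = []
--
--     for i in range(1, N):
--         gaps.append(datas[i] - datas[i - 1])
--
--     gaps.sort()
--
--     return sum(gaps[: -K + 1])
-- ===== SOURCE B (Python) =====
-- def solution(N, K, datas):
--     # Return-value equivalent to A; unlike A it does not sort `datas` in place.
--     if N == 1:
--         return 0
--     xs = sorted(datas)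
--     if K == 1:
--         return xs[-1] - xs[0]
--     # One-pass bounded selection of the K-1 largest gaps: accumulate the gap
--     # total and keep a candidate buffer, truncating it back to the cap largest
--     # (one small sort) whenever it overflows twice the cap;
--     # answer = total of the gaps minus the cap largest of them.
--     cap = max(K - 1, 0)
--     total = 0
--     buf = []
--     for i in range(1, N):
--         g = xs[i] - xs[i - 1]
--         total += g
--         buf.append(g)
--         if len(buf) > 2 * cap:
--             buf = sorted(buf, reverse=True)[:cap]
--     return total - sum(sorted(buf, reverse=True)[:cap])
-- ===== Notes on version B (the rewrite author's own statement) =====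
-- stated objective: alternative
-- what changed: Instead of materialising the gap list, fully sorting it and summing an ascending prefix slice, B accumulates the running total of the gaps and selects only the K-1 largest gaps in one bounded-insertion pass, returning total minus those largest gaps.
-- intended difference: For meaningless non-positive cluster counts K <= 0 with more than 1-K gaps (N+K >= 3) and a nonzero spread among the N smallest points, A's negative-slice arithmetic accidentally returns the sum of only the 1-K smallest gaps, while B treats any K <= 1 as a single cluster and returns the sum of all gaps (the full spread of the first N sorted points), the more defensible value on this unspecified corner. — e.g. on solution(3, 0, [1, 2, 10]): A returns 1, B returns 9
import Mathlib
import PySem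

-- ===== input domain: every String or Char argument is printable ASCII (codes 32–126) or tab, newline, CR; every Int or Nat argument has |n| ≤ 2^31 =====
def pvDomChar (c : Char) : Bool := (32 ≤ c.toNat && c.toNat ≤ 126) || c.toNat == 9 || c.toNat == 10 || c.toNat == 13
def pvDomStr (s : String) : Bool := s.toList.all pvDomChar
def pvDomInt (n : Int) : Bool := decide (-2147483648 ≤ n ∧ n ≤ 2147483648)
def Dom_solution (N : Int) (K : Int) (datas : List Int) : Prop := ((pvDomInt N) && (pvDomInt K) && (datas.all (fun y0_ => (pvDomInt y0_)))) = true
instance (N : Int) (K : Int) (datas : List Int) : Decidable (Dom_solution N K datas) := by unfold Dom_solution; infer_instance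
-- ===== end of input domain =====

-- B replaces A's full gap sort + ascending-prefix sum by a one-pass bounded selection of the
-- K-1 largest gaps (candidate buffer truncated whenever it overflows twice the cap) subtracted
-- from the running total of the gaps (alternative algorithm, similar cost).
-- Equivalence is about the RETURN value: A sorts `datas` in place, B does not mutate it.

-- ===== PORT A =====
def solution (N : Int) (K : Int) (datas : List Int) : Int :=
  if N = 1 then 0
  else
    let ds := PySem.List.sorted datas (fun x => x) false
    if K = 1 then PySem.List.pyGetD ds (-1) 0 - PySem.List.pyGetD ds 0 0
    else
      let gaps := (PySem.List.pyRange 1 N 1).foldl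
        (fun acc i => acc ++ [PySem.List.pyGetD ds i 0 - PySem.List.pyGetD ds (i - 1) 0]) []
      let sg := PySem.List.sorted gaps (fun x => x) false
      (PySem.List.slice sg none (some (-K + 1))).sum

-- ===== PORT B =====
def solution_alt (N : Int) (K : Int) (datas : List Int) : Int :=
  if N = 1 then 0
  else
    let xs := PySem.List.sorted datas (fun x => x) false
    if K = 1 then PySem.List.pyGetD xs (-1) 0 - PySem.List.pyGetD xs 0 0
    else
      let cap := max (K - 1) 0
      let st := (PySem.List.pyRange 1 N 1).foldl
        (fun st i =>
          let g := PySem.List.pyGetD xs i 0 - PySem.List.pyGetD xs (i - 1) 0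
          let b := st.2 ++ [g]
          (st.1 + g,
           if 2 * cap < (b.length : Int)
           then PySem.List.slice (PySem.List.sorted b (fun x => x) true) none (some cap)
           else b))
        ((0 : Int), ([] : List Int))
      st.1 - (PySem.List.slice (PySem.List.sorted st.2 (fun x => x) true) none (some cap)).sum

-- ===== PRECONDITION & SPEC =====
-- Pre_ is exactly the inputs on which the Python A returns normally (elsewhere it raises
-- IndexError: datas[-1] on an empty list, or datas[i] for i up to N-1 when N > len(datas)).
def Pre_solution (N : Int) (K : Int) (datas : List Int) : Prop :=
  N = 1 ∨ (K = 1 ∧ 1 ≤ (datas.length : Int)) ∨ (K ≠ 1 ∧ N ≤ (datas.length : Int))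
instance (N : Int) (K : Int) (datas : List Int) : Decidable (Pre_solution N K datas) := by
  unfold Pre_solution; infer_instance

def pvWitness_solution : Int × Int × List Int := (4, 2, [1, 7, 3, 10])

-- For meaningless non-positive cluster counts K ≤ 0 with more than 1-K gaps (N+K ≥ 3) and a
-- nonzero spread among the N smallest points, A's negative-slice arithmetic accidentally returns
-- the sum of only the 1-K smallest gaps, while B treats any K ≤ 1 as a single cluster and
-- returns the sum of all gaps (the full spread of the first N sorted points), the more
-- defensible value on this unspecified corner.
def D_solution (N : Int) (K : Int) (datas : List Int) : Prop :=
  K ≤ 0 ∧ 3 ≤ N + K ∧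
    PySem.List.pyGetD (PySem.List.sorted datas (fun x => x) false) (N - 1) 0
      ≠ PySem.List.pyGetD (PySem.List.sorted datas (fun x => x) false) 0 0
instance (N : Int) (K : Int) (datas : List Int) : Decidable (D_solution N K datas) := by
  unfold D_solution; infer_instance

def Spec_solution (N : Int) (K : Int) (datas : List Int) (out : Int) : Prop := ¬ D_solution N K datas → out = solution_alt N K datas
instance (N : Int) (K : Int) (datas : List Int) (out : Int) : Decidable (Spec_solution N K datas out) := by unfold Spec_solution; infer_instance

def pvDiffWitness_solution : Int × Int × List Int := (3, 0, [1, 2, 10])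
def pvDiffWitnessOut_solution : Int × Int := (1, 9)

-- ===== CLAIM (what is proved, stated in full; the proofs are below) =====
def Claim_unchanged_solution : Prop := ∀ (N : Int) (K : Int) (datas : List Int), Dom_solution N K datas → Pre_solution N K datas → Spec_solution N K datas (solution N K datas)
def Claim_changed_solution : Prop := Dom_solution (pvDiffWitness_solution.1) (pvDiffWitness_solution.2.1) (pvDiffWitness_solution.2.2) ∧ Pre_solution (pvDiffWitness_solution.1) (pvDiffWitness_solution.2.1) (pvDiffWitness_solution.2.2) ∧ D_solution (pvDiffWitness_solution.1) (pvDiffWitness_solution.2.1) (pvDiffWitness_solution.2.2) ∧ solution (pvDiffWitness_solution.1) (pvDiffWitness_solution.2.1) (pvDiffWitness_solution.2.2) = pvDiffWitnessOut_solution.1 ∧ solution_alt (pvDiffWitness_solution.1) (pvDiffWitness_solution.2.1) (pvDiffWitness_solution.2.2) = pvDiffWitnessOut_solution.2 ∧ pvDiffWitnessOut_solution.1 ≠ pvDiffWitnessOut_solution.2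
def Claim_exact_solution : Prop := ∀ (N : Int) (K : Int) (datas : List Int), Dom_solution N K datas → Pre_solution N K datas → D_solution N K datas → solution N K datas ≠ solution_alt N K datas

-- ===== LEMMAS AND PROOFS =====

-- insertion step used by the analysis: insert g before the first element > g
def insScan : List Int → Int → List Int
  | [], g => [g]
  | a :: t, g => if a ≤ g then a :: insScan t g else g :: a :: t

theorem insScan_perm (t : List Int) (g : Int) : (insScan t g).Perm (g :: t) := by
  induction t with
  | nil => simp [insScan]
  | cons a t ih =>
    by_cases h : a ≤ g
    · simpa [insScan, h] using ((ih.cons a).trans (List.Perm.swap g a t))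
    · simp [insScan, h]

theorem insScan_length (t : List Int) (g : Int) : (insScan t g).length = t.length + 1 :=
  by simpa using (insScan_perm t g).length_eq

theorem insScan_pairwise (t : List Int) (g : Int) (h : t.Pairwise (· ≤ ·)) :
    (insScan t g).Pairwise (· ≤ ·) := by
  induction t with
  | nil => simp [insScan]
  | cons a t ih =>
    rcases List.pairwise_cons.mp h with ⟨ha, ht⟩
    by_cases hag : a ≤ g
    · simp only [insScan, if_pos hag]
      refine List.pairwise_cons.mpr ⟨?_, ih ht⟩
      intro b hb
      rcases List.mem_cons.mp ((insScan_perm t g).mem_iff.mp hb) with hb | hb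
      · simpa [hb] using hag
      · exact ha b hb
    · simp only [insScan, if_neg hag]
      refine List.pairwise_cons.mpr ⟨?_, List.pairwise_cons.mpr ⟨ha, ht⟩⟩
      intro b hb
      rcases List.mem_cons.mp hb with hb | hb
      · omega
      · exact le_trans (by omega) (ha b hb)

-- insert-then-drop when g lands strictly before position d
theorem insScan_drop_of_lt (s : List Int) (g : Int) :
    ∀ (d : Nat) (hd : d < s.length), g < s[d] → (insScan s g).drop (d + 1) = s.drop d := by
  induction s with
  | nil => intro d hd; simp at hd
  | cons a s ih =>
    intro d hd hg
    cases d with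
    | zero =>
      have : ¬ a ≤ g := by simpa using hg
      simp [insScan, this]
    | succ d =>
      by_cases hag : a ≤ g
      · simpa [insScan, hag] using ih d (by simpa using hd) (by simpa using hg)
      · simp [insScan, hag]

theorem insScan_append_of_all_le (u t : List Int) (g : Int) (h : ∀ a ∈ u, a ≤ g) :
    insScan (u ++ t) g = u ++ insScan t g := by
  induction u with
  | nil => simp
  | cons a u ih =>
    have ha : a ≤ g := h a (by simp)
    simp [insScan, ha, ih (fun b hb => h b (by simp [hb]))]

def isort (l : List Int) : List Int := l.foldl insScan []

theorem isort_append_singleton (l : List Int) (g : Int) :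
    isort (l ++ [g]) = insScan (isort l) g := by
  simp [isort, List.foldl_append]

theorem isort_perm (l : List Int) : (isort l).Perm l := by
  induction l using List.reverseRecOn with
  | nil => simp [isort]
  | append_singleton l g ih =>
    rw [isort_append_singleton]
    exact ((insScan_perm _ g).trans ((ih.cons g).trans (List.perm_append_singleton g l).symm))

theorem isort_pairwise (l : List Int) : (isort l).Pairwise (· ≤ ·) := by
  induction l using List.reverseRecOn with
  | nil => simp [isort]
  | append_singleton l g ih =>
    rw [isort_append_singleton]; exact insScan_pairwise _ g ih

theorem sorted_eq_isort (l : List Int) :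
    PySem.List.sorted l (fun x => x) false = isort l :=
  PySem.List.sorted_id_eq_of_perm_of_pairwise l (isort l) (isort_perm l) (isort_pairwise l)

-- the step of B's selection loop, on the tail-kept suffix of a sorted list
theorem step_eq (K : Int) (hK : 2 ≤ K) (s : List Int) (g : Int) (hs : s.Pairwise (· ≤ ·)) :
    (let t := insScan (s.drop (s.length - (K - 1).toNat)) g;
     if K - 1 < (t.length : Int) then t.tail else t)
    = (insScan s g).drop ((insScan s g).length - (K - 1).toNat) := by
  have hkk : ((K - 1).toNat : Int) = K - 1 := Int.toNat_of_nonneg (by omega)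
  set kk := (K - 1).toNat with hkkdef
  have hkk1 : 1 ≤ kk := by omega
  rw [insScan_length s g]
  by_cases hm : s.length < kk
  · have h0 : s.length - kk = 0 := by omega
    have h0' : s.length + 1 - kk = 0 := by omega
    rw [h0, h0', List.drop_zero, List.drop_zero]
    have hc : ¬ K - 1 < ((insScan s g).length : Int) := by
      rw [insScan_length s g]; push_cast; omega
    simp only [hc, if_false]
  · rw [not_lt] at hm
    set d := s.length - kk with hddef
    have hd : d < s.length := by omega
    have hlt0 : (s.drop d).length = kk := by simp [List.length_drop]; omega
    have hlen : (insScan (s.drop d) g).length = kk + 1 := by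
      rw [insScan_length, hlt0]
    have hc : K - 1 < ((insScan (s.drop d) g).length : Int) := by
      rw [hlen]; push_cast; omega
    simp only [hc, if_true]
    have hsub : s.length + 1 - kk = d + 1 := by omega
    rw [hsub]
    by_cases hg : s[d] ≤ g
    · have hu : ∀ a ∈ s.take d, a ≤ g := by
        intro a ha
        obtain ⟨i, hi, rfl⟩ := List.mem_iff_getElem.mp ha
        have hi' : i < d := by
          simp [List.length_take] at hi; omega
        rw [List.getElem_take]
        exact le_trans ((List.pairwise_iff_getElem.mp hs) i d (by omega) hd hi') hg
      have key := insScan_append_of_all_le (s.take d) (s.drop d) g hu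
      rw [List.take_append_drop] at key
      rw [key]
      have hdl : d + 1 = (s.take d).length + 1 := by
        simp [List.length_take]; omega
      rw [hdl, List.drop_append]
      simp
    · rw [not_le] at hg
      have hrhs := insScan_drop_of_lt s g d hd hg
      rw [hrhs]
      have hsplit : s.drop d = s[d] :: s.drop (d + 1) := List.drop_eq_getElem_cons hd
      rw [hsplit]
      have hng : ¬ s[d] ≤ g := by omega
      simp [insScan, hng]

-- abbreviations for the terms the reduced ports share
def sortedOf (datas : List Int) : List Int := PySem.List.sorted datas (fun x => x) false

def gapsOf (N : Int) (datas : List Int) : List Int :=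
  (PySem.List.pyRange 1 N 1).map
    (fun i => PySem.List.pyGetD (sortedOf datas) i 0 - PySem.List.pyGetD (sortedOf datas) (i - 1) 0)

def bufStep (K : Int) (b : List Int) (g : Int) : List Int :=
  if 2 * max (K - 1) 0 < ((b ++ [g]).length : Int)
  then PySem.List.slice (PySem.List.sorted (b ++ [g]) (fun x => x) true) none (some (max (K - 1) 0))
  else b ++ [g]

def topk (k : Nat) (l : List Int) : List Int := (isort l).drop ((isort l).length - k)

theorem reduce_A (N K : Int) (datas : List Int) (h1 : N ≠ 1) (hk1 : K ≠ 1) :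
    solution N K datas
    = (PySem.List.slice (PySem.List.sorted (gapsOf N datas) (fun x => x) false)
        none (some (-K + 1))).sum := by
  unfold solution gapsOf sortedOf
  simp only [if_neg h1, if_neg hk1]
  rw [PySem.List.foldl_append_singleton_eq_map
        (fun i => PySem.List.pyGetD (PySem.List.sorted datas (fun x => x) false) i 0
          - PySem.List.pyGetD (PySem.List.sorted datas (fun x => x) false) (i - 1) 0)
        (PySem.List.pyRange 1 N 1) []]
  simp only [List.nil_append]

theorem reduce_B (N K : Int) (datas : List Int) (h1 : N ≠ 1) (hk1 : K ≠ 1) :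
    solution_alt N K datas
    = (gapsOf N datas).sum
      - (PySem.List.slice
          (PySem.List.sorted ((gapsOf N datas).foldl (bufStep K) []) (fun x => x) true)
          none (some (max (K - 1) 0))).sum := by
  unfold solution_alt gapsOf sortedOf
  simp only [if_neg h1, if_neg hk1]
  have hb : (fun (st : Int × List Int) i =>
      (st.1 + (PySem.List.pyGetD (PySem.List.sorted datas (fun x => x) false) i 0
        - PySem.List.pyGetD (PySem.List.sorted datas (fun x => x) false) (i - 1) 0),
       if 2 * max (K - 1) 0 < ((st.2 ++ [PySem.List.pyGetD (PySem.List.sorted datas (fun x => x) false) i 0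
          - PySem.List.pyGetD (PySem.List.sorted datas (fun x => x) false) (i - 1) 0]).length : Int)
       then PySem.List.slice (PySem.List.sorted (st.2 ++ [PySem.List.pyGetD (PySem.List.sorted datas (fun x => x) false) i 0
          - PySem.List.pyGetD (PySem.List.sorted datas (fun x => x) false) (i - 1) 0]) (fun x => x) true)
          none (some (max (K - 1) 0))
       else st.2 ++ [PySem.List.pyGetD (PySem.List.sorted datas (fun x => x) false) i 0
          - PySem.List.pyGetD (PySem.List.sorted datas (fun x => x) false) (i - 1) 0]))
      = (fun (st : Int × List Int) i =>
        (st.1 + (PySem.List.pyGetD (PySem.List.sorted datas (fun x => x) false) i 0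
          - PySem.List.pyGetD (PySem.List.sorted datas (fun x => x) false) (i - 1) 0),
         bufStep K st.2 (PySem.List.pyGetD (PySem.List.sorted datas (fun x => x) false) i 0
          - PySem.List.pyGetD (PySem.List.sorted datas (fun x => x) false) (i - 1) 0))) := by
    funext st i; rfl
  rw [hb]
  rw [PySem.List.foldl_prod_mk
        (f := fun acc i => acc + (PySem.List.pyGetD (PySem.List.sorted datas (fun x => x) false) i 0
          - PySem.List.pyGetD (PySem.List.sorted datas (fun x => x) false) (i - 1) 0))
        (g := fun acc i => bufStep K acc (PySem.List.pyGetD (PySem.List.sorted datas (fun x => x) false) i 0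
          - PySem.List.pyGetD (PySem.List.sorted datas (fun x => x) false) (i - 1) 0))]
  rw [PySem.List.foldl_add
        (PySem.List.pyRange 1 N 1)
        (fun i => PySem.List.pyGetD (PySem.List.sorted datas (fun x => x) false) i 0
          - PySem.List.pyGetD (PySem.List.sorted datas (fun x => x) false) (i - 1) 0) 0]
  rw [← List.foldl_map
        (f := fun i => PySem.List.pyGetD (PySem.List.sorted datas (fun x => x) false) i 0
          - PySem.List.pyGetD (PySem.List.sorted datas (fun x => x) false) (i - 1) 0)
        (g := bufStep K)]
  simp only [Int.zero_add]

-- descending library sort is the reverse of the ascending one (Int values, identity key)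
theorem desc_eq_reverse (l : List Int) :
    PySem.List.sorted l (fun x => x) true = (PySem.List.sorted l (fun x => x) false).reverse := by
  apply PySem.List.eq_of_perm_of_pairwise_le_of_injective (key := fun x : Int => -x)
  · intro a b h
    have h' : -a = -b := h
    omega
  · exact (PySem.List.sorted_perm l (fun x => x) true).trans
      (((PySem.List.sorted_perm l (fun x => x) false).symm).trans
        (PySem.List.sorted l (fun x => x) false).reverse_perm.symm)
  · exact (PySem.List.sorted_pairwise_rev l (fun x => x)).imp (by intro a b h; omega)
  · exact List.pairwise_reverse.mpr
      ((PySem.List.sorted_pairwise l (fun x => x)).imp (by intro a b h; omega))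

theorem take_rev_eq (S : List Int) (i : Nat) :
    S.reverse.take i = (S.drop (S.length - i)).reverse := by
  have h := List.reverse_take (l := S.reverse) (i := i)
  rw [List.reverse_reverse, List.length_reverse] at h
  calc S.reverse.take i = (S.reverse.take i).reverse.reverse := by rw [List.reverse_reverse]
    _ = (S.drop (S.length - i)).reverse := by rw [h]

-- sum of the keep-slice of the descending sort is the sum of the k largest
theorem slice_desc_sum (b : List Int) (c : Int) (hc : 0 ≤ c) :
    (PySem.List.slice (PySem.List.sorted b (fun x => x) true) none (some c)).sum
    = (topk c.toNat b).sum := by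
  rw [PySem.List.slice_to _ hc, desc_eq_reverse, take_rev_eq, List.sum_reverse,
      sorted_eq_isort, topk]

-- isort of an already ascending list is itself
theorem isort_of_pairwise (X : List Int) (h : X.Pairwise (· ≤ ·)) : isort X = X := by
  rw [← sorted_eq_isort, PySem.List.sorted_eq_self_of_pairwise X (fun x => x) h]

theorem isort_reverse (X : List Int) : isort X.reverse = isort X := by
  rw [← sorted_eq_isort, ← sorted_eq_isort]
  exact PySem.List.sorted_eq_sorted_of_perm X.reverse X (fun x => x)
    (fun a b h => h) X.reverse_perm

-- truncating the buffer to the keep-slice preserves the k largest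
theorem topk_flush (K : Int) (hK : 2 ≤ K) (x : List Int) :
    topk (K - 1).toNat
      (PySem.List.slice (PySem.List.sorted x (fun v => v) true) none (some (max (K - 1) 0)))
    = topk (K - 1).toNat x := by
  have hm : max (K - 1) 0 = K - 1 := by omega
  rw [hm, PySem.List.slice_to _ (by omega), desc_eq_reverse, take_rev_eq, sorted_eq_isort]
  set kk := (K - 1).toNat with hkk
  set X := (isort x).drop ((isort x).length - kk) with hX
  have hXp : X.Pairwise (· ≤ ·) :=
    List.Pairwise.sublist (List.drop_sublist _ _) (isort_pairwise x)
  have hXlen : X.length ≤ kk := by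
    rw [hX, List.length_drop]; omega
  rw [topk, isort_reverse, isort_of_pairwise X hXp]
  have h0 : X.length - kk = 0 := by omega
  rw [h0, List.drop_zero, topk, ← hX]

-- appending one gap transforms the k largest by insert-then-maybe-pop (the step lemma below)
theorem topk_snoc (K : Int) (hK : 2 ≤ K) (x : List Int) (g : Int) :
    topk (K - 1).toNat (x ++ [g])
    = (let t := insScan (topk (K - 1).toNat x) g;
       if K - 1 < (t.length : Int) then t.tail else t) := by
  rw [topk, topk, isort_append_singleton]
  exact (step_eq K hK (isort x) g (isort_pairwise x)).symm

theorem topk_bufStep (K : Int) (hK : 2 ≤ K) (b : List Int) (g : Int) :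
    topk (K - 1).toNat (bufStep K b g) = topk (K - 1).toNat (b ++ [g]) := by
  unfold bufStep
  by_cases hc : 2 * max (K - 1) 0 < (((b ++ [g]).length : Nat) : Int)
  · rw [if_pos hc, topk_flush K hK]
  · rw [if_neg hc]

theorem inv_buf (K : Int) (hK : 2 ≤ K) (l : List Int) :
    topk (K - 1).toNat (l.foldl (bufStep K) []) = topk (K - 1).toNat l := by
  induction l using List.reverseRecOn with
  | nil => rfl
  | append_singleton l g ih =>
    rw [List.foldl_append]
    simp only [List.foldl_cons, List.foldl_nil]
    rw [topk_bufStep K hK, topk_snoc K hK, ih, ← topk_snoc K hK]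

theorem fold_nil_buf (K : Int) (hK : K ≤ 0) (l : List Int) :
    l.foldl (bufStep K) [] = [] := by
  have hm : max (K - 1) 0 = 0 := by omega
  induction l with
  | nil => rfl
  | cons a l ih =>
    rw [List.foldl_cons]
    have h1 : bufStep K [] a = [] := by
      unfold bufStep
      rw [hm, if_pos (by simp)]
      rw [PySem.List.slice_to _ (by omega)]
      simp
    rw [h1]
    exact ih

-- pure telescoping over range
theorem tele_list (f : Nat → Int) : ∀ n : Nat,
    ((List.range n).map (fun k => f (k + 1) - f k)).sum = f n - f 0 := by
  intro n
  induction n with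
  | zero => simp
  | succ n ih =>
    rw [List.range_succ, List.map_append, List.sum_append, ih]
    simp only [List.map_cons, List.map_nil, List.sum_cons, List.sum_nil]
    omega

theorem gaps_eq' (N : Int) (datas : List Int) :
    gapsOf N datas
    = (List.range (N - 1).toNat).map
        (fun k => (sortedOf datas).getD (k + 1) 0 - (sortedOf datas).getD k 0) := by
  unfold gapsOf
  rw [PySem.List.pyRange_one, List.map_map]
  apply List.map_congr_left
  intro k _
  have h1 : (1 : Int) + (k : Int) = ((k + 1 : Nat) : Int) := by push_cast; ring
  simp only [Function.comp_apply, h1]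
  have h2 : ((k + 1 : Nat) : Int) - 1 = ((k : Nat) : Int) := by push_cast; ring
  simp only [h2, PySem.List.pyGetD_natCast]

theorem gaps_sum (N : Int) (datas : List Int) (hN : 1 ≤ N) :
    (gapsOf N datas).sum
    = PySem.List.pyGetD (sortedOf datas) (N - 1) 0 - PySem.List.pyGetD (sortedOf datas) 0 0 := by
  rw [gaps_eq', tele_list (fun k => (sortedOf datas).getD k 0)]
  conv_rhs => rw [show (N - 1) = (((N - 1).toNat : Nat) : Int) from by omega]
  rw [PySem.List.pyGetD_natCast, PySem.List.pyGetD_zero]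

theorem gaps_nonneg (N : Int) (datas : List Int) (hNle : N ≤ (datas.length : Int)) :
    ∀ x ∈ gapsOf N datas, 0 ≤ x := by
  intro x hx
  rw [gaps_eq'] at hx
  obtain ⟨k, hk, rfl⟩ := List.mem_map.mp hx
  rw [List.mem_range] at hk
  have hlen : (sortedOf datas).length = datas.length :=
    PySem.List.length_sorted datas (fun x => x) false
  have hk1 : k + 1 < (sortedOf datas).length := by omega
  rw [List.getD_eq_getElem _ _ hk1, List.getD_eq_getElem _ _ (by omega)]
  have hmono := PySem.List.sorted_id_getElem_mono (xs := datas) (p := k) (q := k + 1)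
    (by omega) (by simpa [sortedOf] using hk1)
  have : (sortedOf datas)[k]'(by omega) ≤ (sortedOf datas)[k + 1]'hk1 := by
    simpa [sortedOf] using hmono
  omega

-- ===== VERDICT (by name: the statement is the Claim_ definition above) =====
theorem solution_spec : Claim_unchanged_solution := by
  intro N K datas _ hpre
  unfold Spec_solution D_solution
  intro hnd
  by_cases h1 : N = 1
  · unfold solution solution_alt; simp only [if_pos h1]
  · by_cases hk1 : K = 1
    · unfold solution solution_alt; simp only [if_neg h1, if_pos hk1]
    · rw [reduce_A N K datas h1 hk1, reduce_B N K datas h1 hk1]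
      set G := gapsOf N datas with hG
      by_cases hK2 : 2 ≤ K
      · rw [slice_desc_sum (G.foldl (bufStep K) []) (max (K - 1) 0) (by omega)]
        have hm : (max (K - 1) 0).toNat = (K - 1).toNat := by omega
        rw [hm, inv_buf K hK2 G, sorted_eq_isort G, topk]
        set S := isort G with hS
        set kk := (K - 1).toNat with hkk
        have hneg : -K + 1 = -((kk : Int)) := by omega
        rw [hneg, PySem.List.slice_to_neg_natCast S kk (by omega)]
        have hsum : (S.take (S.length - kk)).sum + (S.drop (S.length - kk)).sum = G.sum := by
          rw [← List.sum_append, List.take_append_drop]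
          exact (isort_perm G).sum_eq
        omega
      · have hK0 : K ≤ 0 := by omega
        rw [fold_nil_buf K hK0]
        have hm : max (K - 1) 0 = 0 := by omega
        have hz : (PySem.List.slice (PySem.List.sorted ([] : List Int) (fun x => x) true)
            none (some (max (K - 1) 0))).sum = 0 := by
          rw [hm, PySem.List.slice_to _ (by omega)]
          simp
        rw [hz, sub_zero]
        have hNle : N ≤ (datas.length : Int) := by
          rcases hpre with h | h | h
          · exact absurd h h1
          · exact absurd h.1 hk1
          · exact h.2
        have hperm : (PySem.List.sorted G (fun x => x) false).Perm G :=
          PySem.List.sorted_perm G (fun x => x) false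
        by_cases hNK : 3 ≤ N + K
        · -- inside the K ≤ 0 region but with zero spread: every gap is zero
          have heq : PySem.List.pyGetD (sortedOf datas) (N - 1) 0
              = PySem.List.pyGetD (sortedOf datas) 0 0 := by
            by_contra hne
            exact hnd ⟨hK0, hNK, by simpa [sortedOf] using hne⟩
          have hsum0 : G.sum = 0 := by
            rw [hG, gaps_sum N datas (by omega), heq, sub_self]
          have hnn := gaps_nonneg N datas hNle
          rw [← hG] at hnn
          have hall : ∀ x ∈ G, x = 0 := by
            intro x hx
            have h1x := List.single_le_sum hnn x hx
            have h2x := hnn x hx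
            omega
          have hA : ∀ x ∈ PySem.List.slice (PySem.List.sorted G (fun x => x) false)
              none (some (-K + 1)), x = 0 := by
            intro x hx
            exact hall x (hperm.mem_iff.mp (PySem.List.mem_of_mem_slice _ _ _ hx))
          rw [List.sum_eq_zero hA, hsum0]
        · -- fewer gaps than 1-K: A's slice keeps the whole sorted gap list
          rw [PySem.List.slice_to _ (by omega : (0 : Int) ≤ -K + 1)]
          have hlenG : G.length = (N - 1).toNat := by
            rw [hG]; unfold gapsOf
            simp [PySem.List.length_pyRange_one]
          have htake : (PySem.List.sorted G (fun x => x) false).take (-K + 1).toNat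
              = PySem.List.sorted G (fun x => x) false := by
            apply List.take_of_length_le
            rw [PySem.List.length_sorted, hlenG]
            omega
          rw [htake]
          exact hperm.sum_eq

theorem solution_changed : Claim_changed_solution := by
  unfold Claim_changed_solution; decide

theorem solution_tight : Claim_exact_solution := by
  intro N K datas _ hpre hd
  obtain ⟨hK0, hNK, hne⟩ := hd
  have h1 : N ≠ 1 := by omega
  have hk1 : K ≠ 1 := by omega
  have hNle : N ≤ (datas.length : Int) := by
    rcases hpre with h | h | h
    · exact absurd h h1
    · exact absurd h.1 hk1
    · exact h.2
  rw [reduce_A N K datas h1 hk1, reduce_B N K datas h1 hk1]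
  set G := gapsOf N datas with hG
  rw [fold_nil_buf K hK0]
  have hm : max (K - 1) 0 = 0 := by omega
  have hz : (PySem.List.slice (PySem.List.sorted ([] : List Int) (fun x => x) true)
      none (some (max (K - 1) 0))).sum = 0 := by
    rw [hm, PySem.List.slice_to _ (by omega)]
    simp
  rw [hz, sub_zero]
  rw [PySem.List.slice_to _ (by omega : (0 : Int) ≤ -K + 1), sorted_eq_isort G]
  set S := isort G with hS
  set d := (-K + 1).toNat with hd
  intro hAB
  -- facts about the gaps
  have hnn := gaps_nonneg N datas hNle
  rw [← hG] at hnn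
  have hSperm : S.Perm G := isort_perm G
  have hSnn : ∀ x ∈ S, 0 ≤ x := fun x hx => hnn x (hSperm.mem_iff.mp hx)
  have hGsum : G.sum = PySem.List.pyGetD (sortedOf datas) (N - 1) 0
      - PySem.List.pyGetD (sortedOf datas) 0 0 := by
    rw [hG]; exact gaps_sum N datas (by omega)
  have hne' : PySem.List.pyGetD (sortedOf datas) (N - 1) 0
      ≠ PySem.List.pyGetD (sortedOf datas) 0 0 := by simpa [sortedOf] using hne
  have hpos : 0 < G.sum := by
    have h0 : 0 ≤ G.sum := List.sum_nonneg hnn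
    have : G.sum ≠ 0 := by rw [hGsum]; omega
    omega
  have hlenG : G.length = (N - 1).toNat := by
    rw [hG]; unfold gapsOf
    simp [PySem.List.length_pyRange_one]
  have hSlen : S.length = (N - 1).toNat := by
    rw [hSperm.length_eq, hlenG]
  have hdlt : d < S.length := by omega
  -- A = B forces the dropped suffix (the largest gaps) to sum to zero
  have hsplit : (S.take d).sum + (S.drop d).sum = G.sum := by
    rw [← List.sum_append, List.take_append_drop]
    exact hSperm.sum_eq
  have hdrop0 : (S.drop d).sum = 0 := by omega
  have hdropnn : ∀ x ∈ S.drop d, 0 ≤ x := fun x hx =>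
    hSnn x (List.mem_of_mem_drop hx)
  have hdropz : ∀ x ∈ S.drop d, x = 0 := by
    intro x hx
    have h1x := List.single_le_sum hdropnn x hx
    have h2x := hdropnn x hx
    omega
  -- but the suffix is nonempty and dominates every element of S, so S sums to zero
  have hdropne : S.drop d ≠ [] := by
    rw [ne_eq, List.drop_eq_nil_iff]; omega
  obtain ⟨b0, hb0⟩ := List.exists_mem_of_ne_nil _ hdropne
  have hpair : S.Pairwise (· ≤ ·) := isort_pairwise G
  have hle : ∀ a ∈ S.take d, ∀ b ∈ S.drop d, a ≤ b := by
    have h := (List.take_append_drop d S) ▸ hpair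
    exact (List.pairwise_append.mp h).2.2
  have hallz : ∀ x ∈ S, x = 0 := by
    intro x hx
    rw [← List.take_append_drop d S] at hx
    rcases List.mem_append.mp hx with hx | hx
    · have h1x := hle x hx b0 hb0
      have h2x := hdropz b0 hb0
      have h3x := hSnn x (by rw [← List.take_append_drop d S]; exact List.mem_append.mpr (Or.inl hx))
      omega
    · exact hdropz x hx
  have : S.sum = 0 := List.sum_eq_zero hallz
  rw [hSperm.sum_eq] at this
  omega
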